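-- pv_equiv track=rewrite | github.com/Th3C0D3R/Wplace-AutoBotnet-Server | server/pixel_patterns.py | _line_down
-- ===== SOURCE A (Python) =====
-- from typing import Dict, List, Any, Tuple, Optional
-- from collections import defaultdict
--
-- def _line_down(changes: List[Dict[str, Any]]) -> List[Dict[str, Any]]:
--     """Ordenar píxeles por líneas de abajo hacia arriba."""
--     rows: Dict[int, List[Dict[str, Any]]] = defaultdict(list)
--     for ch in changes:
--         rows[int(ch['y'])].append(ch)
--
--     out = []
--     for y in sorted(rows.keys(), reverse=True):
--         row = rows[y]
--         row.sort(key=lambda c: int(c['x']))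
--         out.extend(row)
--     return out
-- ===== SOURCE B (Python) =====
-- def _line_down(changes):
--     """Ordenar píxeles por líneas de abajo hacia arriba."""
--     return sorted(changes, key=lambda c: (-int(c['y']), int(c['x'])))
-- ===== Notes on version B (the rewrite author's own statement) =====
-- stated objective: simpler
-- what changed: Replaced the bucket-by-y-into-a-defaultdict, sort-keys-descending, sort-each-row pass with a single stable sort under the composite key (-y, x).
import Mathlib
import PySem

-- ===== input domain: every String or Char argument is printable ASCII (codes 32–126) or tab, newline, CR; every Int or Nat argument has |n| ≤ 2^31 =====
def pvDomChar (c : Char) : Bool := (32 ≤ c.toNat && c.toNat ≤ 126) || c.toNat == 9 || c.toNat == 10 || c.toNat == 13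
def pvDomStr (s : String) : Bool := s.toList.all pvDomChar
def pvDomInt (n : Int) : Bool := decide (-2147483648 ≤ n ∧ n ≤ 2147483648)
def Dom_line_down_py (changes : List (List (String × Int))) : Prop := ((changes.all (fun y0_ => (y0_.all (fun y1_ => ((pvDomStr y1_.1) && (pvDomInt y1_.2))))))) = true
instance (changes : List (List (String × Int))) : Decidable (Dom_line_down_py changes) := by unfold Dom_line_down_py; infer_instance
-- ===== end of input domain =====

-- B replaces A's bucket-by-y dict + per-row sorts with a single stable sort on the composite key (-y, x); simpler decomposition, same cost.


-- ===== PORT A =====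
-- ch[k] on a dict-as-assoc-list: first match; the default 0 is only reached where Python
-- raises KeyError, which Pre_line_down_py excludes (exact on Pre_).
def pvLookup (ch : List (String × Int)) (k : String) : Int :=
  ((ch.find? (fun p => p.1 == k)).map Prod.snd).getD 0

def line_down_py (changes : List (List (String × Int))) : List (List (String × Int)) :=
  let rows : PySem.Dict Int (List (List (String × Int))) :=
    changes.foldl (fun d ch => d.modify (pvLookup ch "y") [] (fun r => r ++ [ch])) PySem.Dict.empty
  (PySem.List.sorted rows.keys (fun y => y) true).foldl
    (fun out y => out ++ PySem.List.sorted (rows.getD y []) (fun c => pvLookup c "x") false) []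

-- ===== PORT B =====
def line_down_py_alt (changes : List (List (String × Int))) : List (List (String × Int)) :=
  PySem.List.sorted2 changes (fun c => -(pvLookup c "y")) (fun c => pvLookup c "x") false

-- ===== PRECONDITION & SPEC =====
-- Pre_ excludes exactly the dicts missing key 'y' or 'x', on which Python A raises KeyError.
def Pre_line_down_py (changes : List (List (String × Int))) : Prop :=
  ∀ ch ∈ changes, (ch.find? (fun p => p.1 == "y")).isSome = true ∧ (ch.find? (fun p => p.1 == "x")).isSome = true
instance (changes : List (List (String × Int))) : Decidable (Pre_line_down_py changes) := by unfold Pre_line_down_py; infer_instance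

def pvWitness_line_down_py : (List (List (String × Int))) := [[("y", 2), ("x", 1)], [("y", 1), ("x", 3)]]

def Spec_line_down_py (changes : List (List (String × Int))) (out : List (List (String × Int))) : Prop := out = line_down_py_alt changes
instance (changes : List (List (String × Int))) (out : List (List (String × Int))) : Decidable (Spec_line_down_py changes out) := by unfold Spec_line_down_py; infer_instance

-- ===== CLAIM (what is proved, stated in full; the proofs are below) =====
def Claim_equal_line_down_py : Prop := ∀ (changes : List (List (String × Int))), Dom_line_down_py changes → Pre_line_down_py changes → Spec_line_down_py changes (line_down_py changes)

-- ===== LEMMAS AND PROOFS =====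

-- the comparator sorted2 applies for the composite key (-ky, kx)
def pvBef {α : Type} (ky kx : α → Int) (a b : α) : Bool :=
  decide (-(ky a) < -(ky b)) || (!decide (-(ky b) < -(ky a)) && decide (kx a < kx b))

theorem pvBef_lt {α : Type} (ky kx : α → Int) (c b : α) (h : ky b < ky c) : pvBef ky kx c b = true := by
  simp [pvBef]; omega

theorem pvBef_gt {α : Type} (ky kx : α → Int) (c b : α) (h : ky c < ky b) : pvBef ky kx c b = false := by
  simp [pvBef]; omega

theorem pvBef_eq {α : Type} (ky kx : α → Int) (c b : α) (h : ky b = ky c) :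
    pvBef ky kx c b = decide (kx c < kx b) := by
  simp [pvBef, h]

-- insertBy walks past a prefix it refuses to go before
theorem pv_insertBy_skip {α : Type} (bef : α → α → Bool) (c : α) (blk rest : List α)
    (h : ∀ b ∈ blk, bef c b = false) :
    PySem.List.insertBy bef c (blk ++ rest) = blk ++ PySem.List.insertBy bef c rest := by
  induction blk with
  | nil => simp
  | cons y ys ih =>
    have hy : bef c y = false := h y (by simp)
    simp [PySem.List.insertBy, hy, ih (fun b hb => h b (by simp [hb]))]

-- insertBy lands inside a block it compares by bef' when everything after the block accepts c in front
theorem pv_insertBy_block {α : Type} (bef bef' : α → α → Bool) (c : α) (blk rest : List α)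
    (hblk : ∀ b ∈ blk, bef c b = bef' c b) (hrest : ∀ b ∈ rest, bef c b = true) :
    PySem.List.insertBy bef c (blk ++ rest) = PySem.List.insertBy bef' c blk ++ rest := by
  induction blk with
  | nil =>
    cases rest with
    | nil => simp [PySem.List.insertBy]
    | cons r rs => simp [PySem.List.insertBy, hrest r (by simp)]
  | cons y ys ih =>
    have hy : bef c y = bef' c y := hblk y (by simp)
    cases hb : bef' c y with
    | true => simp [PySem.List.insertBy, hy, hb]
    | false =>
      simp [PySem.List.insertBy, hy, hb,
        ih (fun b hbm => hblk b (by simp [hbm]))]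

theorem pv_flatMap_congr {α β : Type} (L : List α) (f g : α → List β)
    (h : ∀ y ∈ L, f y = g y) : L.flatMap f = L.flatMap g := by
  induction L with
  | nil => rfl
  | cons y L ih =>
    simp only [List.flatMap_cons, h y (by simp), ih (fun z hz => h z (by simp [hz]))]

-- inserting c whose y-key already has a block: that block is re-sorted by x, nothing else moves
theorem pv_ins_mem {α : Type} (ky kx : α → Int) (c : α) (G : Int → List α) :
    ∀ L : List Int, L.Pairwise (· > ·) →
      (∀ y ∈ L, ∀ b ∈ G y, ky b = y) → ky c ∈ L →
      PySem.List.insertBy (pvBef ky kx) c (L.flatMap G) =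
        L.flatMap (fun y => if y = ky c then PySem.List.insertBy (fun a b => decide (kx a < kx b)) c (G y) else G y) := by
  intro L
  induction L with
  | nil => intro _ _ h; cases h
  | cons y L ih =>
    intro hp hG hmem
    have hLlt : ∀ z ∈ L, z < y := fun z hz => (List.pairwise_cons.mp hp).1 z hz
    by_cases hy : y = ky c
    · subst hy
      have hrest : ∀ b ∈ L.flatMap G, pvBef ky kx c b = true := by
        intro b hb
        obtain ⟨z, hz, hbz⟩ := List.mem_flatMap.mp hb
        have : ky b = z := hG z (by simp [hz]) b hbz
        exact pvBef_lt ky kx c b (by have := hLlt z hz; omega)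
      have hblk : ∀ b ∈ G (ky c), pvBef ky kx c b = decide (kx c < kx b) := by
        intro b hb; exact pvBef_eq ky kx c b (hG (ky c) (by simp) b hb)
      simp only [List.flatMap_cons]
      rw [pv_insertBy_block (pvBef ky kx) (fun a b => decide (kx a < kx b)) c _ _ hblk hrest]
      congr 1
      exact (pv_flatMap_congr L _ _ (fun z hz =>
        if_neg (fun h : z = ky c => by have := hLlt z hz; omega))).symm
    · have hmem' : ky c ∈ L := by cases List.mem_cons.mp hmem with
        | inl h => exact absurd h.symm hy
        | inr h => exact h
      have hygt : ky c < y := hLlt _ hmem'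
      have hskip : ∀ b ∈ G y, pvBef ky kx c b = false := by
        intro b hb; exact pvBef_gt ky kx c b (by rw [hG y (by simp) b hb]; exact hygt)
      simp only [List.flatMap_cons]
      rw [pv_insertBy_skip _ _ _ _ hskip,
        ih (List.pairwise_cons.mp hp).2 (fun z hz => hG z (by simp [hz])) hmem', if_neg hy]

-- inserting c with a fresh y-key: a new singleton block appears where the key lands
theorem pv_ins_new {α : Type} (ky kx : α → Int) (c : α) (G : Int → List α) :
    ∀ L : List Int, L.Pairwise (· > ·) →
      (∀ y ∈ L, ∀ b ∈ G y, ky b = y) → ky c ∉ L →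
      PySem.List.insertBy (pvBef ky kx) c (L.flatMap G) =
        (PySem.List.insertBy (fun a b : Int => decide (b < a)) (ky c) L).flatMap
          (fun y => if y = ky c then [c] else G y) := by
  intro L
  induction L with
  | nil => simp [PySem.List.insertBy]
  | cons y L ih =>
    intro hp hG hmem
    have hLlt : ∀ z ∈ L, z < y := fun z hz => (List.pairwise_cons.mp hp).1 z hz
    have hy : y ≠ ky c := fun h => hmem (by simp [h])
    by_cases hlt : y < ky c
    · have hrest : ∀ b ∈ (y :: L).flatMap G, pvBef ky kx c b = true := by
        intro b hb
        obtain ⟨z, hz, hbz⟩ := List.mem_flatMap.mp hb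
        have hbk : ky b = z := hG z hz b hbz
        have : z ≤ y := by cases List.mem_cons.mp hz with
          | inl h => omega
          | inr h => have := hLlt z h; omega
        exact pvBef_lt ky kx c b (by omega)
      have h0 := pv_insertBy_block (pvBef ky kx) (pvBef ky kx) c [] ((y :: L).flatMap G)
        (by simp) hrest
      simp only [List.nil_append] at h0
      rw [h0]
      rw [show PySem.List.insertBy (fun a b : Int => decide (b < a)) (ky c) (y :: L)
          = ky c :: y :: L by simp [PySem.List.insertBy, hlt]]
      simp only [List.flatMap_cons, if_neg hy, PySem.List.insertBy]
      congr 2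
      exact (pv_flatMap_congr L _ _ (fun z hz =>
        if_neg (fun h : z = ky c => hmem (h ▸ List.mem_cons_of_mem y hz)))).symm
    · have hygt : ky c < y := by omega
      have hskip : ∀ b ∈ G y, pvBef ky kx c b = false := by
        intro b hb; exact pvBef_gt ky kx c b (by rw [hG y (by simp) b hb]; exact hygt)
      simp only [List.flatMap_cons]
      rw [pv_insertBy_skip _ _ _ _ hskip,
        ih (List.pairwise_cons.mp hp).2 (fun z hz => hG z (by simp [hz])) (fun h => hmem (by simp [h]))]
      rw [show PySem.List.insertBy (fun a b : Int => decide (b < a)) (ky c) (y :: L)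
          = y :: PySem.List.insertBy (fun a b : Int => decide (b < a)) (ky c) L by
        simp [PySem.List.insertBy]; omega]
      simp only [List.flatMap_cons, if_neg hy]

theorem pv_sorted_append_singleton {α κ : Type} [LT κ] [DecidableLT κ] (l : List α) (c : α) (key : α → κ) :
    PySem.List.sorted (l ++ [c]) key false
      = PySem.List.insertBy (fun a b => decide (key a < key b)) c (PySem.List.sorted l key false) := by
  rw [PySem.List.sorted_eq_foldl_insertBy, PySem.List.sorted_eq_foldl_insertBy, List.foldl_append]
  rfl

theorem pv_sorted_rev_append_singleton {α κ : Type} [LT κ] [DecidableLT κ] (l : List α) (c : α) (key : α → κ) :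
    PySem.List.sorted (l ++ [c]) key true
      = PySem.List.insertBy (fun a b => decide (key b < key a)) c (PySem.List.sorted l key true) := by
  rw [PySem.List.sorted_rev_eq_foldl_insertBy, PySem.List.sorted_rev_eq_foldl_insertBy, List.foldl_append]
  rfl

-- sorted(set(xs), reverse=True) is strictly decreasing
theorem pv_keys_pairwise (xs : List Int) :
    (PySem.List.sorted (PySem.Set.ofList xs) (fun y => y) true).Pairwise (· > ·) := by
  have h1 := PySem.List.sorted_pairwise_rev (xs := PySem.Set.ofList xs) (key := fun y => y)
  have h2 : (PySem.List.sorted (PySem.Set.ofList xs) (fun y => y) true).Nodup :=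
    (PySem.List.sorted_perm (xs := PySem.Set.ofList xs) (key := fun y => y) (rev := true)).symm.nodup
      (PySem.Set.nodup_ofList xs)
  exact (h1.and h2).imp (fun {a b} h => by omega)

-- the heart: stable insertion sort under the composite key (-ky, kx) equals
-- "distinct ky values descending, each bucket filtered out then sorted by kx"
theorem pv_main {α : Type} (ky kx : α → Int) (xs : List α) :
    xs.foldl (fun acc x => PySem.List.insertBy (pvBef ky kx) x acc) [] =
      (PySem.List.sorted (PySem.Set.ofList (xs.map ky)) (fun y => y) true).flatMap
        (fun y => PySem.List.sorted (xs.filter (fun c => ky c == y)) kx false) := by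
  induction xs using List.reverseRecOn with
  | nil => rfl
  | append_singleton xs c ih =>
    rw [List.foldl_append, List.foldl_cons, List.foldl_nil, ih]
    set L := PySem.List.sorted (PySem.Set.ofList (xs.map ky)) (fun y => y) true with hL
    have hp : L.Pairwise (· > ·) := pv_keys_pairwise _
    have hG : ∀ y ∈ L, ∀ b ∈ PySem.List.sorted (xs.filter (fun c => ky c == y)) kx false, ky b = y := by
      intro y _ b hb
      exact eq_of_beq (List.mem_filter.mp ((PySem.List.mem_sorted _ _ _ _).mp hb)).2
    have hmemL : ky c ∈ L ↔ ky c ∈ xs.map ky := by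
      rw [hL, PySem.List.mem_sorted, PySem.Set.mem_ofList]
    have hmap : (xs ++ [c]).map ky = xs.map ky ++ [ky c] := by simp
    have hfilter : ∀ y : Int, (xs ++ [c]).filter (fun c' => ky c' == y)
        = xs.filter (fun c' => ky c' == y) ++ (if ky c = y then [c] else []) := by
      intro y; rw [List.filter_append]; congr 1
      by_cases h : ky c = y
      · simp [h]
      · simp [List.filter_cons, h]
    by_cases hmem : ky c ∈ xs.map ky
    · rw [hmap, PySem.Set.ofList_append_singleton,
        PySem.Set.add_of_mem (show ky c ∈ PySem.Set.ofList (xs.map ky) by simpa using hmem), ← hL,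
        pv_ins_mem ky kx c _ L hp hG (hmemL.mpr hmem)]
      apply pv_flatMap_congr
      intro y hy
      by_cases hyc : y = ky c
      · rw [if_pos hyc, hfilter y, if_pos hyc.symm, pv_sorted_append_singleton]
      · rw [if_neg hyc, hfilter y, if_neg (fun h => hyc h.symm), List.append_nil]
    · rw [hmap, PySem.Set.ofList_append_singleton,
        PySem.Set.add_of_not_mem (show ky c ∉ PySem.Set.ofList (xs.map ky) by simpa using hmem),
        pv_sorted_rev_append_singleton, ← hL,
        pv_ins_new ky kx c _ L hp hG (fun h => hmem (hmemL.mp h))]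
      apply pv_flatMap_congr
      intro y hy
      by_cases hyc : y = ky c
      · rw [if_pos hyc, hfilter y, if_pos hyc.symm]
        rw [show xs.filter (fun c' => ky c' == y) = [] from
          List.filter_eq_nil_iff.mpr (fun b hb hbeq =>
            hmem (hyc ▸ (eq_of_beq hbeq) ▸ List.mem_map_of_mem hb))]
        rfl
      · rw [if_neg hyc, hfilter y, if_neg (fun h => hyc h.symm), List.append_nil]

-- B's sorted2 is literally the insertion-sort fold under pvBef
theorem pv_alt_eq_foldl (changes : List (List (String × Int))) :
    line_down_py_alt changes =
      changes.foldl (fun acc x =>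
        PySem.List.insertBy (pvBef (fun c => pvLookup c "y") (fun c => pvLookup c "x")) x acc) [] := rfl

-- A's bucket at y is the y-filter of the input, in input order
theorem pv_bucket (changes : List (List (String × Int))) (y : Int) :
    (changes.foldl (fun d ch => d.modify (pvLookup ch "y") [] (fun r => r ++ [ch]))
        (PySem.Dict.empty : PySem.Dict Int (List (List (String × Int))))).getD y []
      = changes.filter (fun c => pvLookup c "y" == y) := by
  have h := List.foldl_map (f := fun ch : List (String × Int) => (pvLookup ch "y", ch))
    (g := fun (d : PySem.Dict Int (List (List (String × Int)))) (p : Int × List (String × Int)) =>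
      d.modify p.1 [] (fun r => r ++ [p.2]))
    (l := changes) (init := (PySem.Dict.empty : PySem.Dict Int (List (List (String × Int)))))
  simp only at h
  rw [← h, PySem.Dict.getD_foldl_modify_append]
  simp [List.filter_map, List.map_map, Function.comp_def]

theorem pv_final (changes : List (List (String × Int))) :
    line_down_py changes = line_down_py_alt changes := by
  rw [pv_alt_eq_foldl, pv_main]
  unfold line_down_py
  simp only []
  rw [PySem.Dict.keys_foldl_modify_key (key := fun ch => pvLookup ch "y")
      (f := fun _ ch => (fun r => r ++ [ch]))]
  rw [show (PySem.Dict.empty : PySem.Dict Int (List (List (String × Int)))).keys = [] from rfl]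
  rw [PySem.Set.update_nil_left]
  rw [PySem.List.foldl_append_eq_flatMap]
  simp only [List.nil_append]
  apply pv_flatMap_congr
  intro y hy
  rw [pv_bucket]

-- ===== VERDICT (by name: the statement is the Claim_ definition above) =====
theorem line_down_py_spec : Claim_equal_line_down_py := by
  intro changes _ _
  unfold Spec_line_down_py
  exact pv_final changes
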